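-- pv_equiv track=rewrite | github.com/alexgabbia-svg/centraldobarca | testecentral_supabase.py | fmt_rank_from_map
-- ===== SOURCE A (Python) =====
-- def fmt_rank_from_map(map_dict, top_n=None):
--     arr = [(k,v) for k,v in map_dict.items() if v is not None]
--     arr_sorted = sorted(arr, key=lambda x:-x[1])
--     res=[]
--     last_val=None
--     last_pos=0
--     for idx,(name,val) in enumerate(arr_sorted, start=1):
--         pos = last_pos if (last_val is not None and val == last_val) else idx
--         last_pos = pos
--         last_val = val
--         res.append((f"{pos}º", name, val))
--         if top_n and len(res) >= top_n: break
--     return res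
-- ===== SOURCE B (Python) =====
-- def fmt_rank_from_map(map_dict, top_n=None):
--     pairs = sorted([(k, v) for k, v in map_dict.items() if v is not None],
--                    key=lambda x: x[1], reverse=True)
--
--     def rank(val):
--         # competition rank: 1 + number of entries strictly greater
--         return 1 + sum(1 for _, w in pairs if w > val)
--
--     res = []
--     taken = 0
--     for name, val in pairs:
--         res.append(("%dº" % rank(val), name, val))
--         if top_n and taken + 1 >= top_n:
--             break
--         taken += 1
--     return res
-- ===== Notes on version B (the rewrite author's own statement) =====
-- stated objective: alternative
-- what changed: Replaces A's sequential last_val/last_pos tie tracking with the order-free competition-rank formula (rank = 1 + count of strictly greater entries, recounted per emitted entry), trading A's O(n log n) single pass for an O(n^2) but stateless rank computation.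
import Mathlib
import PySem

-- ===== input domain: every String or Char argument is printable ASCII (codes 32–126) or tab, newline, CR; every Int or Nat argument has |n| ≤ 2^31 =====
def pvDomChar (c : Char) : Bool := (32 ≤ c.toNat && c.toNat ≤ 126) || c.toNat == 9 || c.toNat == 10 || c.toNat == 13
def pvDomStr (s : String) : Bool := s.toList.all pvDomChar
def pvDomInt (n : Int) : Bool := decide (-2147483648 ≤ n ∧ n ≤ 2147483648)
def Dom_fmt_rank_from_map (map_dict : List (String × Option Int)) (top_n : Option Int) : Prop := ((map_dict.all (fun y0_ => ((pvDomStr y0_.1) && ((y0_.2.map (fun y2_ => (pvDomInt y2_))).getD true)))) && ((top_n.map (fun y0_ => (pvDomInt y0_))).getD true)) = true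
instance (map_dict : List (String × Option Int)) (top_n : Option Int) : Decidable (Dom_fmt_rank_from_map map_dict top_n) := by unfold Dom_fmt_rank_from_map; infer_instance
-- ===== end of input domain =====

-- B replaces A's sequential last_val/last_pos tie tracking with the order-free competition-rank
-- formula (rank = 1 + number of strictly greater entries, recounted per entry) — an alternative
-- decomposition; A is O(n log n), B is O(n^2), a cost B trades for a stateless rank definition.

-- ===== PORT A =====
-- `pos = last_pos if (last_val is not None and val == last_val) else idx`
def fmtA_pos (lastv : Option Int) (val lastp idx : Int) : Int :=
  match lastv with
  | some lv => if val = lv then lastp else idx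
  | none => idx

-- `top_n and len(res) >= top_n` (A's break guard; cnt = len(res) after the append)
def fmtA_break (tn : Option Int) (cnt : Int) : Bool :=
  match tn with
  | none => false
  | some t => decide (t ≠ 0) && decide (cnt ≥ t)

-- the `for idx,(name,val) in enumerate(arr_sorted, start=1)` loop with last_val/last_pos state
def fmtA_loop : List (String × Int) → Int → Option Int → Int → Int → Option Int → List (String × String × Int)
  | [], _, _, _, _, _ => []
  | (name, val) :: rest, idx, lastv, lastp, cnt, tn =>
    let pos : Int := fmtA_pos lastv val lastp idx
    let entry := (PySem.Int.toStr pos ++ "º", name, val)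
    if fmtA_break tn (cnt + 1) then [entry]
    else entry :: fmtA_loop rest (idx + 1) (some val) pos (cnt + 1) tn

def fmt_rank_from_map (map_dict : List (String × Option Int)) (top_n : Option Int) : List (String × String × Int) :=
  let arr := (PySem.Dict.ofList map_dict).items.filterMap
    (fun kv => match kv.2 with | some v => some (kv.1, v) | none => none)
  let arr_sorted := PySem.List.sorted arr (fun x => -x.2) false
  fmtA_loop arr_sorted 1 none 0 0 top_n

-- ===== PORT B =====
-- `1 + sum(1 for _, w in pairs if w > val)`
def fmtB_rank (pairs : List (String × Int)) (val : Int) : Int :=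
  1 + pairs.foldl (fun acc p => if val < p.2 then acc + 1 else acc) 0

-- the emission loop over `pairs` with `taken` counter and `break`
def fmtB_build (pairs : List (String × Int)) (tn : Option Int) : List (String × Int) → Int → List (String × String × Int)
  | [], _ => []
  | (name, val) :: rest, taken =>
    let entry := (PySem.Int.toStr (fmtB_rank pairs val) ++ "º", name, val)
    match tn with
    | none => entry :: fmtB_build pairs tn rest (taken + 1)
    | some t =>
      if t ≠ 0 ∧ taken + 1 ≥ t then [entry]
      else entry :: fmtB_build pairs tn rest (taken + 1)

def fmt_rank_from_map_alt (map_dict : List (String × Option Int)) (top_n : Option Int) : List (String × String × Int) :=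
  let pairs := PySem.List.sorted
    ((PySem.Dict.ofList map_dict).items.filterMap (fun kv => kv.2.map (fun v => (kv.1, v))))
    (fun x => x.2) true
  fmtB_build pairs top_n pairs 0

-- ===== PRECONDITION & SPEC =====
def Spec_fmt_rank_from_map (map_dict : List (String × Option Int)) (top_n : Option Int) (out : List (String × String × Int)) : Prop := out = fmt_rank_from_map_alt map_dict top_n
instance (map_dict : List (String × Option Int)) (top_n : Option Int) (out : List (String × String × Int)) : Decidable (Spec_fmt_rank_from_map map_dict top_n out) := by unfold Spec_fmt_rank_from_map; infer_instance

-- ===== CLAIM (what is proved, stated in full; the proofs are below) =====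
def Claim_equal_fmt_rank_from_map : Prop := ∀ (map_dict : List (String × Option Int)) (top_n : Option Int), Dom_fmt_rank_from_map map_dict top_n → Spec_fmt_rank_from_map map_dict top_n (fmt_rank_from_map map_dict top_n)

-- ===== LEMMAS AND PROOFS =====

-- B's rank is 1 + (count of strictly greater values)
theorem fmtB_rank_eq (pairs : List (String × Int)) (val : Int) :
    fmtB_rank pairs val = 1 + (pairs.countP (fun p => decide (val < p.2)) : Int) := by
  unfold fmtB_rank
  rw [PySem.List.foldl_ite_add_one]
  omega

-- in a descending list whose first k values all differ from s[k].2, exactly k entries are greater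
theorem count_gt_eq (s : List (String × Int)) (hs : s.Pairwise (fun a b => b.2 ≤ a.2))
    (k : Nat) (hk : k < s.length)
    (hd : ∀ j (hj : j < k), (s[j]'(Nat.lt_trans hj hk)).2 ≠ (s[k]'hk).2) :
    s.countP (fun p => decide ((s[k]'hk).2 < p.2)) = k := by
  have hpg := List.pairwise_iff_getElem.mp hs
  obtain ⟨v, hv⟩ : ∃ v, (s[k]'hk).2 = v := ⟨_, rfl⟩
  rw [hv] at hd ⊢
  have hsplit : s.countP (fun p => decide (v < p.2))
      = (s.take k).countP (fun p => decide (v < p.2))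
      + (s.drop k).countP (fun p => decide (v < p.2)) := by
    conv_lhs => rw [← List.take_append_drop k s]
    rw [List.countP_append]
  have htake : (s.take k).countP (fun p => decide (v < p.2)) = k := by
    have hlen : (s.take k).length = k := by
      rw [List.length_take]; omega
    conv_rhs => rw [← hlen]
    rw [List.countP_eq_length]
    intro a ha
    obtain ⟨j, hj, hja⟩ := List.getElem_of_mem ha
    have hjk : j < k := by rw [hlen] at hj; exact hj
    have : a = s[j]'(by omega) := by
      rw [← hja, List.getElem_take]
    subst this
    have hlt : (s[k]'hk).2 ≤ (s[j]'(by omega)).2 := hpg j k (by omega) hk hjk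
    have hne := hd j hjk
    simp only [decide_eq_true_eq]
    omega
  have hdrop : (s.drop k).countP (fun p => decide (v < p.2)) = 0 := by
    rw [List.countP_eq_zero]
    intro a ha
    obtain ⟨j, hj, hja⟩ := List.getElem_of_mem ha
    have hjlen : k + j < s.length := by
      rw [List.length_drop] at hj; omega
    have : a = s[k + j]'hjlen := by
      rw [← hja, List.getElem_drop]
    subst this
    have hle2 : (s[k + j]'hjlen).2 ≤ (s[k]'hk).2 := by
      rcases Nat.eq_or_lt_of_le (Nat.le_add_right k j) with he | hl
      · have : s[k + j]'hjlen = s[k]'hk := by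
          congr 1; omega
        rw [this]
      · exact hpg k (k + j) hk hjlen hl
    simp only [decide_eq_true_eq]
    omega
  omega

-- main joint lemma: A's tie-tracking emission equals B's count-based recursive builder
theorem loop_eq (s : List (String × Int)) (tn : Option Int)
    (l : List (String × Int)) (i lastp cnt : Int) (lastv : Option Int)
    (hsort : l.Pairwise (fun a b => b.2 ≤ a.2))
    (hle : ∀ lv, lastv = some lv → ∀ p ∈ l, p.2 ≤ lv)
    (hlast : ∀ lv, lastv = some lv → fmtB_rank s lv = lastp)
    (hfirst : ∀ (k : Nat) (hk : k < l.length),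
        (∀ j (hj : j < k), (l[j]'(Nat.lt_trans hj hk)).2 ≠ (l[k]'hk).2) →
        (∀ lv, lastv = some lv → (l[k]'hk).2 ≠ lv) →
        fmtB_rank s (l[k]'hk).2 = i + k) :
    fmtA_loop l i lastv lastp cnt tn = fmtB_build s tn l cnt := by
  induction l generalizing i lastv lastp cnt with
  | nil => rfl
  | cons p rest ihl =>
    obtain ⟨name, val⟩ := p
    rw [List.pairwise_cons] at hsort
    have hdval : fmtB_rank s val = fmtA_pos lastv val lastp i := by
      cases lastv with
      | none =>
        have := hfirst 0 (Nat.succ_pos _) (fun j hj => by omega) (fun lv h => by simp at h)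
        simpa [fmtA_pos] using this
      | some lv =>
        by_cases hv : val = lv
        · subst hv
          simp [fmtA_pos, hlast val rfl]
        · have := hfirst 0 (Nat.succ_pos _) (fun j hj => by omega)
            (fun lv' h => by simp only [Option.some.injEq] at h; subst h; simpa using hv)
          simpa [fmtA_pos, hv] using this
    have hrest : fmtA_loop rest (i + 1) (some val) (fmtA_pos lastv val lastp i) (cnt + 1) tn
        = fmtB_build s tn rest (cnt + 1) := by
      apply ihl
      · exact hsort.2
      · intro lv hlv p hp
        simp only [Option.some.injEq] at hlv
        subst hlv
        exact hsort.1 p hp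
      · intro lv hlv
        simp only [Option.some.injEq] at hlv
        subst hlv
        exact hdval
      · intro k hk hdist hlv
        have hne : val ≠ (rest[k]'hk).2 := (hlv _ rfl).symm
        have hstep := hfirst (k + 1) (by simpa using Nat.succ_lt_succ hk)
          (fun j hj => by
            cases j with
            | zero => simpa using hne
            | succ j' => have := hdist j' (by omega); simpa using this)
          (fun lv' hlv' => by
            intro heq
            have h1 : val ≤ lv' := hle lv' hlv' (name, val) (by simp)
            have h2 : (rest[k]'hk).2 ≤ val := hsort.1 _ (List.getElem_mem hk)
            exact hne (le_antisymm h2 (heq ▸ h1)).symm)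
        simp only [List.getElem_cons_succ] at hstep
        rw [hstep]
        push_cast
        ring
    cases tn with
    | none =>
      simp only [fmtA_loop, fmtB_build, fmtA_break, hdval, Bool.false_eq_true, if_false,
        List.cons.injEq, true_and]
      exact hrest
    | some t =>
      by_cases hb : t ≠ 0 ∧ cnt + 1 ≥ t
      · simp only [fmtA_loop, fmtB_build, fmtA_break, hdval]
        rw [if_pos (by simp [hb.1, hb.2]), if_pos hb]
      · simp only [fmtA_loop, fmtB_build, fmtA_break, hdval]
        rw [if_neg (by intro h; simp at h; exact hb ⟨h.1, h.2⟩), if_neg hb]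
        exact congrArg (List.cons _) hrest

-- ===== VERDICT (by name: the statement is the Claim_ definition above) =====
-- the two ports build the same filtered list and the same sorted order
theorem arr_eq (map_dict : List (String × Option Int)) :
    (PySem.Dict.ofList map_dict).items.filterMap
      (fun kv => match kv.2 with | some v => some (kv.1, v) | none => none)
    = (PySem.Dict.ofList map_dict).items.filterMap (fun kv => kv.2.map (fun v => (kv.1, v))) := by
  apply List.filterMap_congr
  intro kv _
  obtain ⟨k, v⟩ := kv
  cases v <;> rfl

theorem sorted_neg_eq_rev (arr : List (String × Int)) :
    PySem.List.sorted arr (fun x => -x.2) false = PySem.List.sorted arr (fun x => x.2) true := by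
  rw [PySem.List.sorted_eq_foldl_insertBy, PySem.List.sorted_rev_eq_foldl_insertBy]
  congr 1
  funext acc x
  congr 1
  funext a b
  rw [decide_eq_decide]
  omega

theorem fmt_rank_from_map_spec : Claim_equal_fmt_rank_from_map := by
  intro map_dict top_n _
  show fmt_rank_from_map map_dict top_n = fmt_rank_from_map_alt map_dict top_n
  unfold fmt_rank_from_map fmt_rank_from_map_alt
  rw [arr_eq]
  show fmtA_loop (PySem.List.sorted ((PySem.Dict.ofList map_dict).items.filterMap (fun kv => kv.2.map (fun v => (kv.1, v)))) (fun x => -x.2) false) 1 none 0 0 top_n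
    = fmtB_build (PySem.List.sorted ((PySem.Dict.ofList map_dict).items.filterMap (fun kv => kv.2.map (fun v => (kv.1, v)))) (fun x => x.2) true) top_n
        (PySem.List.sorted ((PySem.Dict.ofList map_dict).items.filterMap (fun kv => kv.2.map (fun v => (kv.1, v)))) (fun x => x.2) true) 0
  rw [sorted_neg_eq_rev]
  set s := PySem.List.sorted
    ((PySem.Dict.ofList map_dict).items.filterMap (fun kv => kv.2.map (fun v => (kv.1, v))))
    (fun x => x.2) true with hs
  have hsort : s.Pairwise (fun a b => b.2 ≤ a.2) := by
    have := PySem.List.sorted_pairwise_rev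
      ((PySem.Dict.ofList map_dict).items.filterMap (fun kv => kv.2.map (fun v => (kv.1, v))))
      (fun x => x.2)
    exact this
  exact loop_eq s top_n s 1 0 0 none hsort
    (fun lv h => nomatch h) (fun lv h => nomatch h)
    (fun k hk hdist _ => by
      rw [fmtB_rank_eq, count_gt_eq s hsort k hk hdist])
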